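-- pv_equiv track=rewrite | github.com/LaconicPneumonic/AdventOfCode | 2022/23/main.py | getBoardString
-- ===== SOURCE A (Python) =====
-- def getBoardString(elves):
--
--     minRow = min([e[0] for e in elves])
--     minCol = min([e[1] for e in elves])
--
--     maxRow = max([e[0] for e in elves])
--     maxCol = max([e[1] for e in elves])
--
--     ret = ""
--     for row in range(minRow, maxRow + 1):
--
--         rowString = ""
--
--         for col in range(minCol, maxCol + 1):
--
--             if (row, col) in elves:
--
--                 rowString += "#"
--             else:
--                 rowString += "."
--
--         ret += rowString + "\n"
--
--     return ret
-- ===== SOURCE B (Python) =====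
-- def getBoardString(elves):
--
--     minRow = min([e[0] for e in elves])
--     minCol = min([e[1] for e in elves])
--
--     maxRow = max([e[0] for e in elves])
--     maxCol = max([e[1] for e in elves])
--
--     grid = [["."] * (maxCol - minCol + 1) for _ in range(maxRow - minRow + 1)]
--     for (r, c) in elves:
--         grid[r - minRow][c - minCol] = "#"
--
--     return "".join("".join(row) + "\n" for row in grid)
-- ===== Notes on version B (the rewrite author's own statement) =====
-- stated objective: faster
-- what changed: B allocates a 2-D grid of '.' and scatters '#' once per elf, instead of testing per-cell list membership for every cell of the bounding box.
-- outside the precondition, e.g. on getBoardString(set()): A raises ValueError, B raises ValueError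
import Mathlib
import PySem

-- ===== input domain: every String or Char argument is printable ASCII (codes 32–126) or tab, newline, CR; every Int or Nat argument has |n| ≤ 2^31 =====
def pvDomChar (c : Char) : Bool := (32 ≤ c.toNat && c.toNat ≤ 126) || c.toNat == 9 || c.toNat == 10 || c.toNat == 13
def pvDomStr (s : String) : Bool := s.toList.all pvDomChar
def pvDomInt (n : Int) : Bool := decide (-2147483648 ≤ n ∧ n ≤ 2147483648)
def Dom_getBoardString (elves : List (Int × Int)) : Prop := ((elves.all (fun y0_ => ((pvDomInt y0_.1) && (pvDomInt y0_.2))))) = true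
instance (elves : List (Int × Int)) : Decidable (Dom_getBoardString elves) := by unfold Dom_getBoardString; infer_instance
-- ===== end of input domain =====

-- B replaces A's per-cell membership scan with a 2-D grid of '.' scattered with '#' once per elf (asymptotically fewer membership tests).

-- ===== PORT A =====
def getBoardString (elves : List (Int × Int)) : String :=
  match PySem.List.min? (elves.map (fun e => e.1)) (fun x => x),
        PySem.List.min? (elves.map (fun e => e.2)) (fun x => x),
        PySem.List.max? (elves.map (fun e => e.1)) (fun x => x),
        PySem.List.max? (elves.map (fun e => e.2)) (fun x => x) with
  | some minRow, some minCol, some maxRow, some maxCol =>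
      (PySem.List.pyRange minRow (maxRow + 1) 1).foldl (fun ret row =>
        ret ++ ((PySem.List.pyRange minCol (maxCol + 1) 1).foldl (fun rowString col =>
          rowString ++ (if (row, col) ∈ elves then "#" else ".")) "") ++ "\n") ""
  | _, _, _, _ => ""  -- unreachable: min/max of an empty list raises ValueError, excluded by Pre_

-- ===== PORT B =====
def getBoardString_alt (elves : List (Int × Int)) : String :=
  -- empty input is excluded by Pre_ (min of an empty sequence raises ValueError)
  match PySem.List.min? (elves.map (fun e => e.1)) (fun x => x) with
  | none => ""
  | some minRow =>
  match PySem.List.min? (elves.map (fun e => e.2)) (fun x => x) with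
  | none => ""
  | some minCol =>
  match PySem.List.max? (elves.map (fun e => e.1)) (fun x => x) with
  | none => ""
  | some maxRow =>
  match PySem.List.max? (elves.map (fun e => e.2)) (fun x => x) with
  | none => ""
  | some maxCol =>
      let grid0 := (List.range (maxRow - minRow + 1).toNat).map
        (fun _ => List.replicate (maxCol - minCol + 1).toNat '.')
      -- grid[r - minRow][c - minCol] = '#': both indices are nonnegative and in range
      -- for every elf, so Nat-indexed set/getD is exact here (no Python negative wrap occurs)
      let grid := elves.foldl (fun g e =>
        g.set (e.1 - minRow).toNat
          ((g.getD (e.1 - minRow).toNat []).set (e.2 - minCol).toNat '#')) grid0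
      String.ofList (grid.foldl (fun ret row => ret ++ row ++ ['\n']) [])

-- ===== PRECONDITION & SPEC =====
-- Pre_ excludes only the empty list, on which A raises ValueError (min of an empty sequence).
def Pre_getBoardString (elves : List (Int × Int)) : Prop := elves ≠ []
instance (elves : List (Int × Int)) : Decidable (Pre_getBoardString elves) := by unfold Pre_getBoardString; infer_instance
def pvWitness_getBoardString : (List (Int × Int)) := [((0 : Int), (1 : Int)), ((1 : Int), (0 : Int))]

def Spec_getBoardString (elves : List (Int × Int)) (out : String) : Prop := out = getBoardString_alt elves
instance (elves : List (Int × Int)) (out : String) : Decidable (Spec_getBoardString elves out) := by unfold Spec_getBoardString; infer_instance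

-- ===== CLAIM (what is proved, stated in full; the proofs are below) =====
def Claim_equal_getBoardString : Prop := ∀ (elves : List (Int × Int)), Dom_getBoardString elves → Pre_getBoardString elves → Spec_getBoardString elves (getBoardString elves)

-- ===== LEMMAS AND PROOFS =====

-- setting index i in a range-indexed map updates exactly that entry
theorem pvSet_map_range {α : Type} (i : Nat) (v : α) (f : Nat → α) (n : Nat) :
    ((List.range n).map f).set i v = (List.range n).map (fun k => if k = i then v else f k) := by
  apply List.ext_getElem <;> simp
  intro k hk
  rw [List.getElem_set]
  split <;> rename_i hh
  · simp [hh.symm]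
  · simp; intro he; exact absurd he.symm hh

theorem pvGetD_map_range {α : Type} (n i : Nat) (f : Nat → α) (d : α) (h : i < n) :
    ((List.range n).map f).getD i d = f i := by
  rw [List.getD_eq_getElem] <;> simp [h]

-- the scatter loop of B marks exactly the elf cells
theorem pvScatter (minRow minCol : Int) (h w : Nat) :
    ∀ (es : List (Int × Int)) (P : Nat → Nat → Bool),
    (∀ e ∈ es, minRow ≤ e.1 ∧ (e.1 - minRow).toNat < h ∧ minCol ≤ e.2 ∧ (e.2 - minCol).toNat < w) →
    es.foldl (fun g e =>
        g.set (e.1 - minRow).toNat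
          ((g.getD (e.1 - minRow).toNat []).set (e.2 - minCol).toNat '#'))
      ((List.range h).map (fun i => (List.range w).map (fun j => if P i j then '#' else '.')))
    = (List.range h).map (fun i => (List.range w).map (fun j =>
        if (P i j || decide (((minRow + (i : Int)), (minCol + (j : Int))) ∈ es)) then '#' else '.')) := by
  intro es
  induction es with
  | nil => intro P _; simp
  | cons e rest ih =>
    intro P hb
    obtain ⟨h1, h2, h3, h4⟩ := hb e (List.mem_cons_self ..)
    rw [List.foldl_cons]
    rw [pvGetD_map_range _ _ _ _ h2, pvSet_map_range, pvSet_map_range]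
    have hmid : ((List.range h).map (fun i => if i = (e.1 - minRow).toNat then
          (List.range w).map (fun k => if k = (e.2 - minCol).toNat then '#' else if P (e.1 - minRow).toNat k then '#' else '.')
        else (List.range w).map (fun j => if P i j then '#' else '.')))
        = (List.range h).map (fun i => (List.range w).map (fun j =>
            if ((decide (i = (e.1 - minRow).toNat) && decide (j = (e.2 - minCol).toNat)) || P i j) then '#' else '.')) := by
      apply List.map_congr_left
      intro i _
      by_cases hi : i = (e.1 - minRow).toNat
      · simp only [hi]
        apply List.map_congr_left
        intro j _
        by_cases hj : j = (e.2 - minCol).toNat <;> simp [hj]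
      · simp only [if_neg hi]
        apply List.map_congr_left
        intro j _
        simp [hi]
    rw [hmid, ih _ (fun x hx => hb x (List.mem_cons_of_mem _ hx))]
    apply List.map_congr_left
    intro i _
    apply List.map_congr_left
    intro j _
    congr 1
    have hiff : ((minRow + (i : Int)), (minCol + (j : Int))) = e ↔
        (i = (e.1 - minRow).toNat ∧ j = (e.2 - minCol).toNat) := by
      constructor
      · intro hpe
        have : minRow + (i : Int) = e.1 ∧ minCol + (j : Int) = e.2 := by
          constructor <;> simp [← hpe]
        omega
      · intro ⟨hi, hj⟩
        have : minRow + (i : Int) = e.1 ∧ minCol + (j : Int) = e.2 := by omega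
        calc ((minRow + (i : Int)), (minCol + (j : Int))) = (e.1, e.2) := by rw [this.1, this.2]
          _ = e := rfl
    simp [List.mem_cons, hiff]
    tauto

-- A's inner loop builds the row string character by character
theorem pvInnerFold (p : Int → Prop) [DecidablePred p] (L : List Int) :
    ∀ (s : List Char),
    L.foldl (fun rs col => rs ++ (if p col then "#" else ".")) (String.ofList s)
    = String.ofList (s ++ L.map (fun col => if p col then '#' else '.')) := by
  induction L with
  | nil => intro s; simp
  | cons a t ih =>
    intro s
    rw [List.foldl_cons]
    have : String.ofList s ++ (if p a then "#" else ".") =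
        String.ofList (s ++ [if p a then '#' else '.']) := by
      have h1 : ("#" : String) = String.ofList ['#'] := by decide
      have h2 : ("." : String) = String.ofList ['.'] := by decide
      by_cases hp : p a <;> simp only [hp, if_pos, ite_false, h1, h2, ← String.ofList_append]
    rw [this, ih]
    simp

-- A's outer loop concatenates the rows (each followed by '\n')
theorem pvOuterFold (rc : Int → List Char) (L : List Int) :
    ∀ (s : List Char),
    L.foldl (fun ret row => ret ++ String.ofList (rc row) ++ "\n") (String.ofList s)
    = String.ofList (s ++ (L.map (fun row => rc row ++ ['\n'])).flatten) := by
  induction L with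
  | nil => intro s; simp
  | cons a t ih =>
    intro s
    rw [List.foldl_cons]
    have : String.ofList s ++ String.ofList (rc a) ++ "\n" =
        String.ofList (s ++ (rc a ++ ['\n'])) := by
      rw [show ("\n" : String) = String.ofList ['\n'] from by decide]
      simp only [← String.ofList_append, List.append_assoc]
    rw [this, ih]
    simp

-- B's output loop concatenates the grid rows (each followed by '\n')
theorem pvJoinRows (g : List (List Char)) :
    ∀ (s : List Char),
    g.foldl (fun ret row => ret ++ row ++ ['\n']) s
    = s ++ (g.map (fun row => row ++ ['\n'])).flatten := by
  induction g with
  | nil => intro s; simp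
  | cons a t ih => intro s; rw [List.foldl_cons, ih]; simp

-- ===== VERDICT (by name: the statement is the Claim_ definition above) =====
theorem getBoardString_spec : Claim_equal_getBoardString := by
  intro elves _ hne
  unfold Spec_getBoardString
  have hne0 : elves ≠ [] := hne
  have hne1 : elves.map (fun e => e.1) ≠ [] := by simp [hne0]
  have hne2 : elves.map (fun e => e.2) ≠ [] := by simp [hne0]
  obtain ⟨minRow, hm1⟩ : ∃ m, PySem.List.min? (elves.map (fun e => e.1)) (fun x => x) = some m := by
    cases hmm : PySem.List.min? (elves.map (fun e => e.1)) (fun x => x) with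
    | none => exact absurd ((PySem.List.min?_eq_none_iff _ _).mp hmm) hne1
    | some m => exact ⟨m, rfl⟩
  obtain ⟨minCol, hm2⟩ : ∃ m, PySem.List.min? (elves.map (fun e => e.2)) (fun x => x) = some m := by
    cases hmm : PySem.List.min? (elves.map (fun e => e.2)) (fun x => x) with
    | none => exact absurd ((PySem.List.min?_eq_none_iff _ _).mp hmm) hne2
    | some m => exact ⟨m, rfl⟩
  obtain ⟨maxRow, hm3⟩ : ∃ m, PySem.List.max? (elves.map (fun e => e.1)) (fun x => x) = some m := by
    cases hmm : PySem.List.max? (elves.map (fun e => e.1)) (fun x => x) with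
    | none => exact absurd ((PySem.List.max?_eq_none_iff _ _).mp hmm) hne1
    | some m => exact ⟨m, rfl⟩
  obtain ⟨maxCol, hm4⟩ : ∃ m, PySem.List.max? (elves.map (fun e => e.2)) (fun x => x) = some m := by
    cases hmm : PySem.List.max? (elves.map (fun e => e.2)) (fun x => x) with
    | none => exact absurd ((PySem.List.max?_eq_none_iff _ _).mp hmm) hne2
    | some m => exact ⟨m, rfl⟩
  have hbnd : ∀ e ∈ elves, minRow ≤ e.1 ∧ (e.1 - minRow).toNat < (maxRow - minRow + 1).toNat ∧
      minCol ≤ e.2 ∧ (e.2 - minCol).toNat < (maxCol - minCol + 1).toNat := by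
    intro e he
    have b1 := PySem.List.min?_isMin hm1 e.1 (List.mem_map_of_mem he)
    have b2 := PySem.List.min?_isMin hm2 e.2 (List.mem_map_of_mem he)
    have b3 := PySem.List.max?_isMax hm3 e.1 (List.mem_map_of_mem he)
    have b4 := PySem.List.max?_isMax hm4 e.2 (List.mem_map_of_mem he)
    simp only at b1 b2 b3 b4
    omega
  simp only [getBoardString, getBoardString_alt, hm1, hm2, hm3, hm4]
  -- A side: turn the two string-building folds into String.ofList of mapped char lists
  have hinner : ∀ row : Int,
      (PySem.List.pyRange minCol (maxCol + 1) 1).foldl (fun rowString col =>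
        rowString ++ (if (row, col) ∈ elves then "#" else ".")) ""
      = String.ofList ((PySem.List.pyRange minCol (maxCol + 1) 1).map
          (fun col => if (row, col) ∈ elves then '#' else '.')) := by
    intro row
    have := pvInnerFold (fun col => (row, col) ∈ elves) (PySem.List.pyRange minCol (maxCol + 1) 1) []
    simpa using this
  simp only [hinner]
  rw [show ("" : String) = String.ofList [] from rfl]
  rw [pvOuterFold]
  -- B side: the initial grid is the all-'.' grid, then scatter and join
  have hrep : (fun _ : Nat => List.replicate (maxCol - minCol + 1).toNat '.')
      = (fun _ : Nat => (List.range (maxCol - minCol + 1).toNat).map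
          (fun _ => if (false : Bool) then '#' else '.')) := by
    funext i
    simp [List.map_const']
  rw [hrep]
  rw [pvScatter minRow minCol _ _ elves (fun _ _ => false) hbnd]
  rw [pvJoinRows]
  congr 1
  rw [List.nil_append, List.map_map]
  rw [PySem.List.pyRange_one minRow (maxRow + 1), PySem.List.pyRange_one minCol (maxCol + 1)]
  rw [List.map_map]
  rw [show maxRow + 1 - minRow = maxRow - minRow + 1 from by ring]
  rw [show maxCol + 1 - minCol = maxCol - minCol + 1 from by ring]
  apply congrArg
  apply List.map_congr_left
  intro i _
  simp [Function.comp, List.map_map]
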